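-- pv_equiv track=rewrite | github.com/lordjuacs/ICC-Trabajos | Ciclo 1/Examen 3/test.py | major
-- ===== SOURCE A (Python) =====
-- def major(matriz):
--     if len(matriz) == 1:
--         return matriz[0]
--     else:
--         alumno = matriz[0]
--         if sum(alumno) > sum(major(matriz[1:])):
--             return alumno
--         else:
--             return major(matriz[1:])
-- ===== SOURCE B (Python) =====
-- def major(matriz):
--     best = matriz[0]
--     best_sum = sum(best)
--     for fila in matriz[1:]:
--         s = sum(fila)
--         if s >= best_sum:
--             best, best_sum = fila, s
--     return best
-- ===== Notes on version B (the rewrite author's own statement) =====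
-- stated objective: faster
-- what changed: Replaced the exponential double recursion (major(matriz[1:]) is recomputed twice per level) with a single iterative pass keeping the running best row and its sum, using >= so ties resolve to the last maximal row exactly like A.
import Mathlib
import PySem

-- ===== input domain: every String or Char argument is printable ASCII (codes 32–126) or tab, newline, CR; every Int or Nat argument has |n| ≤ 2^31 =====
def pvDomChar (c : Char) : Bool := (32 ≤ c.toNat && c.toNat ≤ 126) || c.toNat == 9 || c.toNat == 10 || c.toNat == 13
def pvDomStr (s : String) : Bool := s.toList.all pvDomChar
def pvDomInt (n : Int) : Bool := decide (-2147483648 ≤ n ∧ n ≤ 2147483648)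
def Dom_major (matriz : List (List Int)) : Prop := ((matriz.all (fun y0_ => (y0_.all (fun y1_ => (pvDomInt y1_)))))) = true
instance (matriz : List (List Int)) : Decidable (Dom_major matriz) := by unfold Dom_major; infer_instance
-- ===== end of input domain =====

-- B replaces A's exponential double recursion by one iterative pass over the rows
-- (running best row + its sum, '>=' so ties keep the last maximal row, like A).
-- ===== PORT A =====
def major (matriz : List (List Int)) : List Int :=
  match matriz with
  | [] => []                     -- Python: matriz[0] raises IndexError; excluded by Pre_major
  | [a] => a                     -- len(matriz) == 1
  | a :: rest =>
    if a.sum > (major rest).sum then a else major rest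

-- ===== PORT B =====
def majorStep (acc : List Int × Int) (fila : List Int) : List Int × Int :=
  if acc.2 ≤ fila.sum then (fila, fila.sum) else acc

def major_alt (matriz : List (List Int)) : List Int :=
  match matriz with
  | [] => []                     -- Python: matriz[0] raises IndexError; excluded by Pre_major
  | b :: rest => (rest.foldl majorStep (b, b.sum)).1

-- ===== PRECONDITION & SPEC =====
-- Pre_ excludes only the empty matrix, on which the Python A (and B) raises IndexError.
def Pre_major (matriz : List (List Int)) : Prop := matriz ≠ []
instance (matriz : List (List Int)) : Decidable (Pre_major matriz) := by unfold Pre_major; infer_instance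
def pvWitness_major : List (List Int) := [[1, 2], [3]]
def Spec_major (matriz : List (List Int)) (out : List Int) : Prop := out = major_alt matriz
instance (matriz : List (List Int)) (out : List Int) : Decidable (Spec_major matriz out) := by unfold Spec_major; infer_instance

-- ===== CLAIM (what is proved, stated in full; the proofs are below) =====
def Claim_equal_major : Prop := ∀ (matriz : List (List Int)), Dom_major matriz → Pre_major matriz → Spec_major matriz (major matriz)

-- ===== LEMMAS AND PROOFS =====
-- the best row's sum dominates the head row's sum
theorem major_head_le : ∀ (s : List (List Int)) (b : List Int), b.sum ≤ (major (b :: s)).sum := by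
  intro s
  induction s with
  | nil => intro b; simp [major]
  | cons c u ih =>
    intro b
    simp only [major]
    split
    · exact le_refl _
    · omega

-- dropping a row strictly dominated by the head does not change A's result
theorem major_drop (b x : List Int) (s : List (List Int)) (h : b.sum < x.sum) :
    major (x :: b :: s) = major (x :: s) := by
  cases s with
  | nil => simp [major, h]
  | cons c u =>
    show (if x.sum > (major (b :: c :: u)).sum then x else major (b :: c :: u)) =
         (if x.sum > (major (c :: u)).sum then x else major (c :: u))
    by_cases hb : b.sum > (major (c :: u)).sum
    · simp only [major, if_pos hb]
      rw [if_pos (by omega), if_pos (by omega)]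
    · simp only [major]
      rw [if_neg hb]

-- the fold computes A's recursive best (with its sum) for any seed row
theorem foldl_major : ∀ (t : List (List Int)) (x : List Int),
    t.foldl majorStep (x, x.sum) = (major (x :: t), (major (x :: t)).sum) := by
  intro t
  induction t with
  | nil => intro x; simp [major]
  | cons b s ih =>
    intro x
    show List.foldl majorStep (majorStep (x, x.sum) b) s = _
    by_cases h : x.sum ≤ b.sum
    · rw [show majorStep (x, x.sum) b = (b, b.sum) by simp [majorStep, h], ih b]
      have hx : ¬ x.sum > (major (b :: s)).sum := by
        have := major_head_le s b; omega
      cases s with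
      | nil =>
        show _ = (major [x, b], (major [x, b]).sum)
        simp only [major] at hx ⊢
        rw [if_neg hx]
      | cons c u =>
        show _ = (major (x :: b :: c :: u), (major (x :: b :: c :: u)).sum)
        simp only [major] at hx ⊢
        rw [if_neg hx]
    · rw [show majorStep (x, x.sum) b = (x, x.sum) by simp [majorStep, h], ih x,
          major_drop b x s (by omega)]

-- ===== VERDICT (by name: the statement is the Claim_ definition above) =====
theorem major_spec : Claim_equal_major := by
  intro matriz _ hpre
  cases matriz with
  | nil => exact absurd rfl hpre
  | cons b rest =>
    show major (b :: rest) = major_alt (b :: rest)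
    simp [major_alt, foldl_major]
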